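-- pv_equiv track=rewrite | github.com/Rekt77/Algorithm | programmers/programmers_stock.py | solution
-- ===== SOURCE A (Python) =====
-- def solution(prices):
--     answer = [0]*len(prices)
--     stack = []
--     for i,price in enumerate(prices):
--         while stack and price<prices[stack[-1]]:
--             idx = stack.pop()
--             answer[idx] = i - idx
--         stack.append(i)
--
--     while stack:
--         idx = stack.pop()
--         answer[idx] = len(prices) - idx - 1
--
--     return answer
-- ===== SOURCE B (Python) =====
-- def solution(prices):
--     n = len(prices)
--     answer = []
--     for i in range(n):
--         cnt = 0
--         for j in range(i + 1, n):
--             cnt += 1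
--             if prices[j] < prices[i]:
--                 break
--         answer.append(cnt)
--     return answer
-- ===== Notes on version B (the rewrite author's own statement) =====
-- stated objective: simpler
-- what changed: Replaced the monotonic index stack plus in-place answer array with a direct per-index forward scan: for each i, count days until the first strictly lower price.
import Mathlib
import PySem

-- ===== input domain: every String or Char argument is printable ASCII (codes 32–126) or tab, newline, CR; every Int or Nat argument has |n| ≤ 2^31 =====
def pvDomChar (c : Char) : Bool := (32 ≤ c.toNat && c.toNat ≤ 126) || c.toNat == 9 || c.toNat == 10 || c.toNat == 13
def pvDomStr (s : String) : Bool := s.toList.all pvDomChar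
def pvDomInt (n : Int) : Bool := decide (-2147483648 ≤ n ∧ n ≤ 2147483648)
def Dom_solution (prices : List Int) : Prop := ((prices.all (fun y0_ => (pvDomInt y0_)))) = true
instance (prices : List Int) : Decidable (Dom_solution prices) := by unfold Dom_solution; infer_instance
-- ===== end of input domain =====

-- B replaces A's monotonic index stack with a plain per-index forward scan (simpler; same return value).

-- ===== PORT A =====
-- the Python 'while stack and price < prices[stack[-1]]' loop; the stack is kept with its TOP at the list head
def popLoopA (prices : List Int) (i : Int) (price : Int) (ans : List Int) : List Int → List Int × List Int
  | [] => (ans, [])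
  | idx :: st =>
    if price < PySem.List.pyGetD prices idx 0 then
      popLoopA prices i price (PySem.List.pySetD ans idx (i - idx)) st
    else (ans, idx :: st)

-- the final 'while stack' drain loop
def drainA (prices : List Int) (ans : List Int) : List Int → List Int
  | [] => ans
  | idx :: st => drainA prices (PySem.List.pySetD ans idx (PySem.List.len prices - idx - 1)) st

def solution (prices : List Int) : List Int :=
  let answer := PySem.List.pyRepeat [(0 : Int)] (PySem.List.len prices)
  let r := (PySem.List.enumerate prices).foldl
    (fun (s : List Int × List Int) (ip : Int × Int) =>
      let t := popLoopA prices ip.1 ip.2 s.1 s.2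
      (t.1, ip.1 :: t.2))
    (answer, ([] : List Int))
  drainA prices r.1 r.2

-- ===== PORT B =====
-- inner 'for j in range(i+1, n): cnt += 1; if prices[j] < prices[i]: break' over the suffix after i
def scanCount (p : Int) : List Int → Int
  | [] => 0
  | x :: xs => if x < p then 1 else 1 + scanCount p xs

def solution_alt (prices : List Int) : List Int :=
  (List.range prices.length).map (fun i => scanCount (prices.getD i 0) (prices.drop (i + 1)))

-- ===== PRECONDITION & SPEC =====
def Spec_solution (prices : List Int) (out : List Int) : Prop := out = solution_alt prices
instance (prices : List Int) (out : List Int) : Decidable (Spec_solution prices out) := by unfold Spec_solution; infer_instance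

-- ===== CLAIM (what is proved, stated in full; the proofs are below) =====
def Claim_equal_solution : Prop := ∀ (prices : List Int), Dom_solution prices → Spec_solution prices (solution prices)

-- ===== LEMMAS AND PROOFS =====

-- the value B computes for index m
def specB (prices : List Int) (m : Nat) : Int :=
  scanCount (prices.getD m 0) (prices.drop (m + 1))

theorem popLoopA_cons (prices : List Int) (i price : Int) (ans : List Int) (idx : Int)
    (st : List Int) :
    popLoopA prices i price ans (idx :: st)
      = if price < PySem.List.pyGetD prices idx 0 then
          popLoopA prices i price (PySem.List.pySetD ans idx (i - idx)) st
        else (ans, idx :: st) := rfl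

theorem drainA_cons (prices : List Int) (ans : List Int) (idx : Int) (st : List Int) :
    drainA prices ans (idx :: st)
      = drainA prices (PySem.List.pySetD ans idx (PySem.List.len prices - idx - 1)) st := rfl

theorem scanCount_of_none (p : Int) (l : List Int)
    (h : ∀ j, j < l.length → ¬ l.getD j 0 < p) : scanCount p l = (l.length : Int) := by
  induction l with
  | nil => simp [scanCount]
  | cons x xs ih =>
    have hx := h 0 (by simp)
    simp only [List.getD_cons_zero] at hx
    simp only [scanCount, if_neg hx]
    rw [ih (fun j hj => by simpa using h (j + 1) (by simpa using hj))]
    simp; ring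

theorem scanCount_of_found (p : Int) (m : Nat) (l : List Int)
    (hm : m < l.length)
    (hbefore : ∀ j, j < m → ¬ l.getD j 0 < p)
    (hat : l.getD m 0 < p) : scanCount p l = (m : Int) + 1 := by
  induction m generalizing l with
  | zero =>
    cases l with
    | nil => simp at hm
    | cons x xs =>
      simp only [List.getD_cons_zero] at hat
      simp [scanCount, hat]
  | succ m ih =>
    cases l with
    | nil => simp at hm
    | cons x xs =>
      have hx := hbefore 0 (Nat.succ_pos m)
      simp only [List.getD_cons_zero] at hx
      simp only [scanCount, if_neg hx]
      rw [ih xs (by simpa using hm)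
          (fun j hj => by simpa using hbefore (j + 1) (by omega))
          (by simpa using hat)]
      push_cast; ring

theorem getD_drop (prices : List Int) (a j : Nat) :
    (prices.drop a).getD j 0 = prices.getD (a + j) 0 := by
  simp [List.getD, List.getElem?_drop]

theorem specB_found (prices : List Int) (idx i : Nat)
    (hii : idx < i) (hin : i < prices.length)
    (hmid : ∀ j, idx < j → j < i → prices.getD idx 0 ≤ prices.getD j 0)
    (hlt : prices.getD i 0 < prices.getD idx 0) :
    specB prices idx = (i : Int) - (idx : Int) := by
  unfold specB
  have hm : i - idx - 1 < (prices.drop (idx + 1)).length := by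
    simp [List.length_drop]; omega
  rw [scanCount_of_found (prices.getD idx 0) (i - idx - 1) _ hm
      (fun j hj => by
        rw [getD_drop]
        exact not_lt.mpr (hmid (idx + 1 + j) (by omega) (by omega)))
      (by rw [getD_drop]; have : idx + 1 + (i - idx - 1) = i := by omega
          rw [this]; exact hlt)]
  omega

theorem specB_none (prices : List Int) (idx : Nat)
    (hidx : idx < prices.length)
    (hmid : ∀ j, idx < j → j < prices.length → prices.getD idx 0 ≤ prices.getD j 0) :
    specB prices idx = (prices.length : Int) - (idx : Int) - 1 := by
  unfold specB
  rw [scanCount_of_none (prices.getD idx 0) _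
      (fun j hj => by
        simp only [List.length_drop] at hj
        rw [getD_drop]
        exact not_lt.mpr (hmid (idx + 1 + j) (by omega) (by omega)))]
  simp [List.length_drop]; omega

-- behaviour of the pop loop under the stack invariant
theorem popLoopA_ok (prices : List Int) (i : Nat) (hi : i < prices.length) :
    ∀ (stN : List Nat) (ans : List Int),
    ans.length = prices.length →
    stN.Pairwise (fun a b => b < a ∧ prices.getD b 0 ≤ prices.getD a 0) →
    (∀ m ∈ stN, m < i) →
    (∀ m ∈ stN, ∀ j, m < j → j < i → prices.getD m 0 ≤ prices.getD j 0) →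
    (∀ m, m < i → m ∉ stN → ans.getD m 0 = specB prices m) →
    ∃ stN' : List Nat,
      (popLoopA prices (i : Int) (prices.getD i 0) ans (stN.map (fun (m : Nat) => (m : Int)))).2
        = stN'.map (fun (m : Nat) => (m : Int)) ∧
      (popLoopA prices (i : Int) (prices.getD i 0) ans (stN.map (fun (m : Nat) => (m : Int)))).1.length
        = prices.length ∧
      stN' <:+ stN ∧
      (∀ m, m < i → m ∉ stN' →
        (popLoopA prices (i : Int) (prices.getD i 0) ans (stN.map (fun (m : Nat) => (m : Int)))).1.getD m 0
          = specB prices m) ∧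
      (∀ m ∈ stN', prices.getD m 0 ≤ prices.getD i 0) := by
  intro stN
  induction stN with
  | nil =>
    intro ans hlen _ _ _ h5
    exact ⟨[], by simp [popLoopA], by simp [popLoopA, hlen], List.nil_suffix, by
      intro m hm _; simpa [popLoopA] using h5 m hm (by simp), by simp⟩
  | cons idx rest ih =>
    intro ans hlen hpw h3 h4 h5
    have hidxi : idx < i := h3 idx (by simp)
    have hgetD : PySem.List.pyGetD prices ((idx : Nat) : Int) 0 = prices.getD idx 0 := by
      simp [PySem.List.pyGetD_natCast]
    by_cases hcond : prices.getD i 0 < prices.getD idx 0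
    · -- pop idx, set answer[idx] := i - idx, recurse
      have hset : PySem.List.pySetD ans ((idx : Nat) : Int) ((i : Int) - (idx : Int))
          = ans.set idx ((i : Int) - (idx : Int)) := by
        simp [PySem.List.pySetD_natCast]
      have hstep : popLoopA prices (i : Int) (prices.getD i 0) ans
            ((idx :: rest).map (fun (m : Nat) => (m : Int)))
          = popLoopA prices (i : Int) (prices.getD i 0)
              (ans.set idx ((i : Int) - (idx : Int))) (rest.map (fun (m : Nat) => (m : Int))) := by
        rw [List.map_cons, popLoopA_cons, hgetD, if_pos hcond, hset]
      have hspecIdx : specB prices idx = (i : Int) - (idx : Int) :=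
        specB_found prices idx i hidxi hi
          (fun j hj1 hj2 => h4 idx (by simp) j hj1 hj2) hcond
      have h5' : ∀ m, m < i → m ∉ rest →
          (ans.set idx ((i : Int) - (idx : Int))).getD m 0 = specB prices m := by
        intro m hm hmrest
        by_cases hmi : m = idx
        · subst hmi
          rw [List.getD_eq_getElem _ _ (by simp [hlen]; omega)]
          rw [List.getElem_set_self (by simp [hlen]; omega)]
          exact hspecIdx.symm
        · rw [List.getD, List.getElem?_set_ne (by omega)]
          exact h5 m hm (by simp [hmi, hmrest])
      obtain ⟨stN', e1, e2, e3, e4, e5⟩ := ih (ans.set idx ((i : Int) - (idx : Int)))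
        (by simp [hlen]) (hpw.of_cons)
        (fun m hm => h3 m (by simp [hm]))
        (fun m hm => h4 m (by simp [hm])) h5'
      exact ⟨stN', by rw [hstep]; exact e1, by rw [hstep]; exact e2,
        e3.trans (List.suffix_cons idx rest), by intro m hm hm'; rw [hstep]; exact e4 m hm hm',
        e5⟩
    · -- stop: price ≥ top of stack
      have hstep : popLoopA prices (i : Int) (prices.getD i 0) ans
            ((idx :: rest).map (fun (m : Nat) => (m : Int)))
          = (ans, (idx :: rest).map (fun (m : Nat) => (m : Int))) := by
        rw [List.map_cons, popLoopA_cons, hgetD, if_neg hcond]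
      refine ⟨idx :: rest, by rw [hstep], by rw [hstep]; exact hlen, List.suffix_refl _,
        ?_, ?_⟩
      · intro m hm hm'; rw [hstep]; exact h5 m hm hm'
      · intro m hm
        rcases List.mem_cons.mp hm with h | h
        · subst h; exact not_lt.mp hcond
        · have := (List.pairwise_cons.mp hpw).1 m h
          exact le_trans this.2 (not_lt.mp hcond)

-- the main loop, recast as a fold over List.range
def stepA (prices : List Int) (s : List Int × List Int) (k : Nat) : List Int × List Int :=
  let t := popLoopA prices (k : Int) (prices.getD k 0) s.1 s.2
  (t.1, ((k : Nat) : Int) :: t.2)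

def stateA (prices : List Int) (k : Nat) : List Int × List Int :=
  (List.range k).foldl (stepA prices) (List.replicate prices.length 0, [])

theorem mainInv (prices : List Int) :
    ∀ k, k ≤ prices.length →
    ∃ stN : List Nat,
      (stateA prices k).2 = stN.map (fun (m : Nat) => (m : Int)) ∧
      (stateA prices k).1.length = prices.length ∧
      stN.Pairwise (fun a b => b < a ∧ prices.getD b 0 ≤ prices.getD a 0) ∧
      (∀ m ∈ stN, m < k) ∧
      (∀ m ∈ stN, ∀ j, m < j → j < k → prices.getD m 0 ≤ prices.getD j 0) ∧
      (∀ m, m < k → m ∉ stN → (stateA prices k).1.getD m 0 = specB prices m) := by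
  intro k
  induction k with
  | zero =>
    intro _
    exact ⟨[], by simp [stateA], by simp [stateA], by simp, by simp, by simp, by omega⟩
  | succ k ih =>
    intro hk
    obtain ⟨stN, e1, e2, e3, e4, e5, e6⟩ := ih (by omega)
    have hkn : k < prices.length := by omega
    have hstate : stateA prices (k + 1) = stepA prices (stateA prices k) k := by
      unfold stateA
      rw [List.range_succ, List.foldl_append, List.foldl_cons, List.foldl_nil]
    obtain ⟨stN', f1, f2, f3, f4, f5⟩ := popLoopA_ok prices k hkn stN (stateA prices k).1
      e2 e3 e4 e5 e6
    have hsub : ∀ m ∈ stN', m ∈ stN := fun m hm => f3.subset hm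
    refine ⟨k :: stN', ?_, ?_, ?_, ?_, ?_, ?_⟩
    · rw [hstate]; simp only [stepA]; rw [e1]
      simp only [List.map_cons, ← f1]
    · rw [hstate]; simp only [stepA]; rw [e1]
      exact f2
    · refine List.pairwise_cons.mpr ⟨?_, e3.sublist f3.sublist⟩
      intro m hm
      exact ⟨e4 m (hsub m hm), f5 m hm⟩
    · intro m hm
      rcases List.mem_cons.mp hm with h | h
      · omega
      · have := e4 m (hsub m h); omega
    · intro m hm j hj1 hj2
      rcases List.mem_cons.mp hm with h | h
      · omega
      · by_cases hjk : j = k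
        · subst hjk; exact f5 m h
        · exact e5 m (hsub m h) j hj1 (by omega)
    · intro m hm hm'
      have hmk : m ≠ k := fun h => hm' (h ▸ List.mem_cons_self ..)
      have hmlt : m < k := by omega
      rw [hstate]; simp only [stepA]; rw [e1]
      exact f4 m hmlt (fun h => hm' (List.mem_cons_of_mem _ h))

theorem drainA_ok (prices : List Int) :
    ∀ (stN : List Nat) (ans : List Int),
    ans.length = prices.length →
    (∀ m ∈ stN, m < prices.length) →
    (∀ m ∈ stN, ∀ j, m < j → j < prices.length → prices.getD m 0 ≤ prices.getD j 0) →
    (∀ m, m < prices.length → m ∉ stN → ans.getD m 0 = specB prices m) →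
    (drainA prices ans (stN.map (fun (m : Nat) => (m : Int)))).length = prices.length ∧
    (∀ m, m < prices.length →
      (drainA prices ans (stN.map (fun (m : Nat) => (m : Int)))).getD m 0 = specB prices m) := by
  intro stN
  induction stN with
  | nil =>
    intro ans hlen _ _ h5
    exact ⟨by simpa [drainA] using hlen, fun m hm => by simpa [drainA] using h5 m hm (by simp)⟩
  | cons idx rest ih =>
    intro ans hlen h3 h4 h5
    have hidx : idx < prices.length := h3 idx (by simp)
    have hset : PySem.List.pySetD ans ((idx : Nat) : Int)
          (PySem.List.len prices - (idx : Nat) - 1)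
        = ans.set idx ((prices.length : Int) - (idx : Int) - 1) := by
      simp [PySem.List.pySetD_natCast, PySem.List.len_eq]
    have hstep : drainA prices ans ((idx :: rest).map (fun (m : Nat) => (m : Int)))
        = drainA prices (ans.set idx ((prices.length : Int) - (idx : Int) - 1))
            (rest.map (fun (m : Nat) => (m : Int))) := by
      rw [List.map_cons, drainA_cons, hset]
    rw [hstep]
    apply ih
    · simp [hlen]
    · intro m hm; exact h3 m (by simp [hm])
    · intro m hm; exact h4 m (by simp [hm])
    · intro m hm hmrest
      by_cases hmi : m = idx
      · subst hmi
        rw [List.getD_eq_getElem _ _ (by simp [hlen]; omega)]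
        rw [List.getElem_set_self (by simp [hlen]; omega)]
        exact (specB_none prices m hidx (fun j hj1 hj2 => h4 m (by simp) j hj1 hj2)).symm
      · rw [List.getD, List.getElem?_set_ne (by omega)]
        exact h5 m hm (by simp [hmi, hmrest])

-- bridge: the fold in 'solution' over 'enumerate prices' is the fold of stepA over List.range
theorem solution_eq_drain_state (prices : List Int) :
    solution prices
      = drainA prices (stateA prices prices.length).1 (stateA prices prices.length).2 := by
  unfold solution
  have henum : PySem.List.enumerate prices
      = (List.range prices.length).map
          (fun k => (((k : Nat) : Int), prices.getD k 0)) := by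
    rw [PySem.List.enumerate_eq_map_pyRange (d := 0)]
    rw [PySem.List.len_eq, PySem.List.pyRange_zero_natCast]
    rw [List.map_map]
    refine List.map_congr_left ?_
    intro k hk
    simp [PySem.List.pyGetD_natCast]
  have hinit : PySem.List.pyRepeat [(0 : Int)] (PySem.List.len prices)
      = List.replicate prices.length (0 : Int) := by
    rw [PySem.List.pyRepeat_singleton]
    simp [PySem.List.len_eq]
  simp only [henum, List.foldl_map, hinit]
  rfl

theorem solution_alt_eq_map (prices : List Int) :
    solution_alt prices = (List.range prices.length).map (specB prices) := rfl

-- ===== VERDICT (by name: the statement is the Claim_ definition above) =====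
theorem solution_spec : Claim_equal_solution := by
  unfold Claim_equal_solution
  intro prices _
  unfold Spec_solution
  obtain ⟨stN, e1, e2, _, e4, e5, e6⟩ := mainInv prices prices.length (le_refl _)
  have hdrain := drainA_ok prices stN (stateA prices prices.length).1 e2 e4 e5 e6
  rw [← e1] at hdrain
  rw [solution_eq_drain_state, solution_alt_eq_map]
  apply List.ext_getElem
  · rw [hdrain.1]; simp
  · intro m hm1 hm2
    have hmn : m < prices.length := by
      have := hm1; rw [hdrain.1] at this; exact this
    have := hdrain.2 m hmn
    rw [List.getD_eq_getElem _ _ hm1] at this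
    rw [this]
    simp
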